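-- pv_equiv track=rewrite | github.com/JohnnyD3pp/Algoritmos-2-Semestre | Atividade 02/Q5.py | calcular_aluno_com_mais_falta
-- ===== SOURCE A (Python) =====
-- def calcular_aluno_com_mais_falta(por_aluno):
--     aluno = []
--     maior = 0
--
--     for nome, info in por_aluno.items():
--         if info.get("F") != None:
--             if info.get("F") == maior:
--                 aluno.append(nome)
--             if info.get("F") > maior:
--                 aluno = [nome]
--                 maior = info.get("F")
--     if len(aluno) == 0 or maior == 0:
--         aluno = ["Nenhum aluno possui falta"]
--     return aluno
-- ===== SOURCE B (Python) =====
-- def calcular_aluno_com_mais_falta(por_aluno):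
--     faltas = [info.get("F") for info in por_aluno.values() if info.get("F") is not None]
--     maior = max(faltas, default=0)
--     aluno = [nome for nome, info in por_aluno.items() if info.get("F") == maior]
--     if not aluno or maior <= 0:
--         return ["Nenhum aluno possui falta"]
--     return aluno
-- ===== Notes on version B (the rewrite author's own statement) =====
-- stated objective: simpler
-- what changed: Replaces A's single fused scan that maintains a running maximum and a candidate list it resets on each new maximum by two independent comprehensions: first compute the maximum absence count, then collect the names attaining it, with one final guard.
import Mathlib
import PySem

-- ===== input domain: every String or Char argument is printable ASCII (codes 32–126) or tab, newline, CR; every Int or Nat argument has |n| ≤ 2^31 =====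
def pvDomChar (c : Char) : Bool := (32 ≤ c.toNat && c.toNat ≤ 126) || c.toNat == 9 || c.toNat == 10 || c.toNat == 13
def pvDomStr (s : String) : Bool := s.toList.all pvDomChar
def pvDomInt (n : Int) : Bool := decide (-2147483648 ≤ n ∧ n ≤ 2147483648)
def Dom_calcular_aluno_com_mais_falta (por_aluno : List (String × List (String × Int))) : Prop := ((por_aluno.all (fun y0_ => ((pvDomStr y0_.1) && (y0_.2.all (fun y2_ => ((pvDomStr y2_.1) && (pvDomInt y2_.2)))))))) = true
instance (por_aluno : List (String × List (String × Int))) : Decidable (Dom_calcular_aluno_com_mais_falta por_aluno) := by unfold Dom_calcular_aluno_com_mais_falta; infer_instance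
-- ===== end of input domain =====

-- B replaces A's fused running-max scan by two comprehensions (max first, then the names attaining it); objective: simpler. Equal return value on every input.

-- ===== PORT A =====
def calcular_aluno_com_mais_falta (por_aluno : List (String × List (String × Int))) : List String :=
  let st := por_aluno.foldl (fun (st : List String × Int) np =>
    match np.2.lookup "F" with
    | none => st
    | some f =>
      let aluno := if f = st.2 then st.1 ++ [np.1] else st.1
      if st.2 < f then ([np.1], f) else (aluno, st.2)) ([], 0)
  if st.1.length = 0 ∨ st.2 = 0 then ["Nenhum aluno possui falta"] else st.1

-- ===== PORT B =====
def calcular_aluno_com_mais_falta_alt (por_aluno : List (String × List (String × Int))) : List String :=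
  let faltas : List Int := por_aluno.filterMap (fun p => p.2.lookup "F")
  let maior : Int := (PySem.List.max? faltas (fun x => x)).getD 0
  let aluno : List String := por_aluno.filterMap (fun p => if p.2.lookup "F" = some maior then some p.1 else none)
  if aluno = [] ∨ maior ≤ 0 then ["Nenhum aluno possui falta"] else aluno

-- ===== PRECONDITION & SPEC =====
def Spec_calcular_aluno_com_mais_falta (por_aluno : List (String × List (String × Int))) (out : List String) : Prop := out = calcular_aluno_com_mais_falta_alt por_aluno
instance (por_aluno : List (String × List (String × Int))) (out : List String) : Decidable (Spec_calcular_aluno_com_mais_falta por_aluno out) := by unfold Spec_calcular_aluno_com_mais_falta; infer_instance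

-- ===== CLAIM (what is proved, stated in full; the proofs are below) =====
def Claim_equal_calcular_aluno_com_mais_falta : Prop := ∀ (por_aluno : List (String × List (String × Int))), Dom_calcular_aluno_com_mais_falta por_aluno → Spec_calcular_aluno_com_mais_falta por_aluno (calcular_aluno_com_mais_falta por_aluno)

-- ===== LEMMAS AND PROOFS =====

-- running maximum of the present "F" values, as A's loop maintains it
def pvMx (l : List (String × List (String × Int))) (m : Int) : Int :=
  l.foldl (fun m p =>
    match p.2.lookup "F" with
    | none => m
    | some f => max m f) m

-- the names whose "F" value equals v, in order (B's second comprehension)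
def pvSel (l : List (String × List (String × Int))) (v : Int) : List String :=
  l.filterMap (fun p => if p.2.lookup "F" = some v then some p.1 else none)

lemma pvMx_le (l : List (String × List (String × Int))) (m : Int) : m ≤ pvMx l m := by
  induction l generalizing m with
  | nil => simp [pvMx]
  | cons p t ih =>
    simp only [pvMx, List.foldl_cons]
    cases h : p.2.lookup "F" with
    | none => exact ih m
    | some f => exact le_trans (le_max_left m f) (ih (max m f))

lemma pvMx_eq_foldl (l : List (String × List (String × Int))) (m : Int) :
    pvMx l m = (l.filterMap (fun p => p.2.lookup "F")).foldl max m := by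
  induction l generalizing m with
  | nil => rfl
  | cons p t ih =>
    simp only [pvMx, List.foldl_cons, List.filterMap_cons]
    cases h : p.2.lookup "F" with
    | none => simpa [pvMx] using ih m
    | some f => simpa [pvMx] using ih (max m f)

-- A's loop, characterised: final maior is the running max; final aluno is the names
-- attaining it (prefixed by the initial list when the max never moved).
lemma pvLoopA (l : List (String × List (String × Int))) (al : List String) (m : Int) :
    l.foldl (fun (st : List String × Int) np =>
      match np.2.lookup "F" with
      | none => st
      | some f =>
        let aluno := if f = st.2 then st.1 ++ [np.1] else st.1
        if st.2 < f then ([np.1], f) else (aluno, st.2)) (al, m)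
    = ((if pvMx l m = m then al else []) ++ pvSel l (pvMx l m), pvMx l m) := by
  induction l generalizing al m with
  | nil => simp [pvMx, pvSel]
  | cons p t ih =>
    simp only [List.foldl_cons]
    cases h : p.2.lookup "F" with
    | none =>

      rw [ih al m]
      have h1 : pvMx (p :: t) m = pvMx t m := by simp [pvMx, h]
      have h2 : pvSel (p :: t) (pvMx t m) = pvSel t (pvMx t m) := by simp [pvSel, h]
      rw [h1, h2]
    | some f =>

      by_cases hlt : m < f
      · have hmx : pvMx (p :: t) m = pvMx t f := by
          simp [pvMx, h, max_eq_right (le_of_lt hlt)]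
        simp only [if_pos hlt]
        rw [ih [p.1] f]
        have hne : pvMx t f ≠ m := by
          have := pvMx_le t f; omega
        rw [hmx]
        simp only [pvSel, List.filterMap_cons, h, hne]
        by_cases he : pvMx t f = f
        · simp [he]
        · have : ¬ (f = pvMx t f) := fun hc => he hc.symm
          simp [he, this]
      · have hmax : max m f = m := max_eq_left (by omega)
        have hmx : pvMx (p :: t) m = pvMx t m := by
          simp [pvMx, h, hmax]
        simp only [if_neg hlt]
        by_cases he : f = m
        · rw [if_pos he, ih (al ++ [p.1]) m, hmx]
          simp only [pvSel, List.filterMap_cons, h]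
          by_cases hm : pvMx t m = m
          · simp [hm, he, List.append_assoc]
          · have hfm : ¬ (f = pvMx t m) := by rw [he]; exact fun hc => hm hc.symm
            simp [hm, hfm]
        · rw [if_neg he, ih al m, hmx]
          simp only [pvSel, List.filterMap_cons, h]
          have : ¬ (f = pvMx t m) := by
            have := pvMx_le t m
            intro hc; apply he; omega
          simp [this]

lemma pvFoldl_max_shift (l : List Int) (a b : Int) :
    l.foldl max (max a b) = max a (l.foldl max b) := by
  induction l generalizing b with
  | nil => rfl
  | cons x t ih =>
    simp only [List.foldl_cons, max_assoc, ih (max b x)]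

-- ===== VERDICT (by name: the statement is the Claim_ definition above) =====
theorem calcular_aluno_com_mais_falta_spec : Claim_equal_calcular_aluno_com_mais_falta := by
  intro l _
  show calcular_aluno_com_mais_falta l = calcular_aluno_com_mais_falta_alt l
  unfold calcular_aluno_com_mais_falta calcular_aluno_com_mais_falta_alt
  rw [pvLoopA l [] 0]
  simp only [ite_self, List.nil_append]
  have hsel_def : ∀ v : Int,
      List.filterMap (fun p => if List.lookup "F" p.2 = some v then some p.1 else none) l = pvSel l v :=
    fun _ => rfl
  cases hf : l.filterMap (fun p => p.2.lookup "F") with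
  | nil =>
    have hM : pvMx l 0 = 0 := by rw [pvMx_eq_foldl, hf]; rfl
    have hm0 : (PySem.List.max? ([] : List Int) (fun x => x)).getD 0 = 0 := rfl
    rw [hM, hm0, hsel_def 0]
    rw [if_pos (Or.inr rfl), if_pos (Or.inr (le_refl 0))]
  | cons x t =>
    have hmb : (PySem.List.max? (x :: t) (fun x => x)).getD 0 = t.foldl max x := by
      rw [PySem.List.max?_id_cons]; rfl
    set mb := t.foldl max x with hmbdef
    have hmem : mb ∈ x :: t := by
      rcases PySem.List.foldl_max_mem t x with h | h
      · rw [← hmbdef] at h; rw [h]; exact List.mem_cons_self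
      · exact List.mem_cons_of_mem x h
    have hMfold : pvMx l 0 = max 0 mb := by
      rw [pvMx_eq_foldl, hf]
      simp only [List.foldl_cons]
      have h0 : max (0 : Int) x = max 0 (max 0 x) := by omega
      calc t.foldl max (max 0 x) = t.foldl max (max 0 (max 0 x)) := by rw [← h0]
        _ = max 0 (t.foldl max (max 0 x)) := pvFoldl_max_shift t 0 (max 0 x)
        _ = max 0 (max 0 (t.foldl max x)) := by rw [pvFoldl_max_shift t 0 x]
        _ = max 0 mb := by omega
    by_cases hpos : 0 < mb
    · have hM : pvMx l 0 = mb := by rw [hMfold]; omega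
      have hselne : pvSel l mb ≠ [] := by
        intro hnil
        rcases List.mem_filterMap.mp (hf ▸ hmem : mb ∈ l.filterMap (fun p => p.2.lookup "F")) with ⟨p, hp, hpf⟩
        have := List.filterMap_eq_nil_iff.mp hnil p hp
        simp [hpf] at this
      have hlen : (pvSel l mb).length ≠ 0 := fun hc => hselne (List.eq_nil_of_length_eq_zero hc)
      rw [hM, hmb, hsel_def mb]
      rw [if_neg (not_or.mpr ⟨hlen, by omega⟩), if_neg (not_or.mpr ⟨hselne, by omega⟩)]
    · have hM : pvMx l 0 = 0 := by rw [hMfold]; omega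
      rw [hM, hmb, hsel_def mb]
      rw [if_pos (Or.inr rfl), if_pos (Or.inr (by omega))]
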